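-- pv_equiv track=rewrite | github.com/ricky00-dev/mlpa_grading | AI/id_recog/normalize_and_validate.py | match_to_student_list
-- ===== SOURCE A (Python) =====
-- def _edit_distance(s1: str, s2: str) -> int:
--     """두 문자열 간의 편집거리(Levenshtein distance) 계산"""
--     if len(s1) < len(s2):
--         return _edit_distance(s2, s1)
--
--     if len(s2) == 0:
--         return len(s1)
--
--     previous_row = range(len(s2) + 1)
--
--     for i, c1 in enumerate(s1):
--         current_row = [i + 1]
--         for j, c2 in enumerate(s2):
--             # 삽입, 삭제, 대체 중 최소값
--             insertions = previous_row[j + 1] + 1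
--             deletions = current_row[j] + 1
--             substitutions = previous_row[j] + (c1 != c2)
--             current_row.append(min(insertions, deletions, substitutions))
--         previous_row = current_row
--
--     return previous_row[-1]
--
-- def match_to_student_list(
--     candidate: str,
--     student_id_list: list[str],
--     allow_edit_distance_1: bool = True
-- ) -> str | None:
--     """
--     후보 학번을 학번 리스트와 매칭합니다.
--
--     매칭 정책:
--     1. Exact match → 채택
--     2. Edit distance 1 후보가 1개 → 채택
--     3. Edit distance 1 후보가 2개+ → None (모호, 사용자 입력 유도)
--
--     Args:
--         candidate: 후보 학번
--         student_id_list: 유효한 학번 리스트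
--         allow_edit_distance_1: 편집거리 1 허용 여부
--
--     Returns:
--         매칭된 학번 (없거나 모호하면 None)
--     """
--     if not candidate or not student_id_list:
--         return None
--
--     # 1. Exact match
--     if candidate in student_id_list:
--         return candidate
--
--     # 2. Edit distance 1 매칭 (허용된 경우)
--     if allow_edit_distance_1:
--         matches = []
--         for student_id in student_id_list:
--             if _edit_distance(candidate, student_id) == 1:
--                 matches.append(student_id)
--
--         # 정확히 1개 매치되면 채택
--         if len(matches) == 1:
--             return matches[0]
--
--         # 2개 이상이면 모호 → None
--         # (자동 결정 금지, 사용자 입력 유도)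
--
--     return None
-- ===== SOURCE B (Python) =====
-- def _one_edit_apart(a: str, b: str) -> bool:
--     """True iff Levenshtein distance between a and b is exactly 1 (single O(L) scan)."""
--     la, lb = len(a), len(b)
--     if la > lb:
--         a, b, la, lb = b, a, lb, la
--     if lb - la > 1:
--         return False
--     i = 0
--     while i < la and a[i] == b[i]:
--         i += 1
--     if la == lb:
--         return i < la and a[i + 1:] == b[i + 1:]
--     return a[i:] == b[i + 1:]
--
--
-- def match_to_student_list(
--     candidate: str,
--     student_id_list: list[str],
--     allow_edit_distance_1: bool = True
-- ) -> str | None: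
--     if not candidate or not student_id_list:
--         return None
--     if candidate in student_id_list:
--         return candidate
--     if allow_edit_distance_1:
--         count = 0
--         found = None
--         for sid in student_id_list:
--             if _one_edit_apart(candidate, sid):
--                 count += 1
--                 if count > 1:
--                     return None
--                 found = sid
--         if count == 1:
--             return found
--     return None
-- ===== Notes on version B (the rewrite author's own statement) =====
-- stated objective: alternative
-- what changed: Replaces A's per-id O(L^2) Levenshtein DP by a direct O(L) two-pointer one-edit-apart check (common-prefix skip + suffix compare) and an early exit once a second fuzzy match is found.
import Mathlib
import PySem

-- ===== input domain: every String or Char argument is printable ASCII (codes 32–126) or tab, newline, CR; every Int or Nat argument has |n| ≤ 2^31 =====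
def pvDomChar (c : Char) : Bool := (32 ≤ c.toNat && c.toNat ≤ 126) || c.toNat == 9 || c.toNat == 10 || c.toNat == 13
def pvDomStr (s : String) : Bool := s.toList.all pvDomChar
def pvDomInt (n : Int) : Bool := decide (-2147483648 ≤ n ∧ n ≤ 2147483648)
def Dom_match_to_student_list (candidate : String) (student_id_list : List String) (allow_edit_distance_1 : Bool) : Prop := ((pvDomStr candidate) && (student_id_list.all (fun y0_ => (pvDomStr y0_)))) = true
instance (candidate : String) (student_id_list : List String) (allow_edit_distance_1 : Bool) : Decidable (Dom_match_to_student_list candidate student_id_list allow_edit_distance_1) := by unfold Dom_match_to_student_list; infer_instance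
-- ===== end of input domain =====

-- ===== PORT A =====
-- B replaces the per-id Levenshtein DP by a single-pass two-pointer one-edit scan
-- and exits early once a second fuzzy match is found (objective: alternative).

-- inner loop of _edit_distance: walks previous_row and s2 in lockstep, appending
-- min(insertions, deletions, substitutions); `last` is current_row[j].
-- previous_row always has length len(s2)+1, so previous_row[j+1] is prest.headD 0.
def aInner (c1 : Char) : Int → List Int → List Char → List Int
  | _, _, [] => []
  | last, p0 :: prest, c2 :: crest =>
      let insertions := prest.headD 0 + 1
      let deletions := last + 1
      let substitutions := p0 + (if c1 ≠ c2 then 1 else 0)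
      let v := min (min insertions deletions) substitutions
      v :: aInner c1 v prest crest
  | _, [], _ :: _ => []  -- unreachable: previous_row is longer than s2

-- outer loop of _edit_distance over enumerate(s1); current_row starts as [i+1]
def aOuter : Int → List Int → List Char → List Char → List Int
  | _, prev, [], _ => prev
  | i, prev, c1 :: rest, s2 => aOuter (i + 1) ((i + 1) :: aInner c1 (i + 1) prev s2) rest s2

-- _edit_distance after the one-time swap; previous_row[-1] via pyGet? (row is
-- always nonempty, so the .getD 0 default is never used)
def editDistCore (s1 s2 : List Char) : Int :=
  if s2 = [] then (s1.length : Int)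
  else (PySem.List.pyGet? (aOuter 0 (PySem.List.pyRange 0 ((s2.length : Int) + 1) 1) s1 s2) (-1)).getD 0

def editDistA (s1 s2 : List Char) : Int :=
  if s1.length < s2.length then editDistCore s2 s1 else editDistCore s1 s2

def match_to_student_list (candidate : String) (student_id_list : List String) (allow_edit_distance_1 : Bool) : Option String :=
  if candidate = "" ∨ student_id_list = [] then none
  else if candidate ∈ student_id_list then some candidate
  else if allow_edit_distance_1 then
    let ms := student_id_list.filter (fun sid => editDistA candidate.toList sid.toList == 1)
    if ms.length = 1 then ms.head? else none
  else none

-- ===== PORT B =====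
-- the while-loop of _one_edit_apart and the two returns after it; `sameLen` = (la == lb).
-- caller guarantees len a ≤ len b, so the (_ :: _, []) case is unreachable.
def oneEditSkip (sameLen : Bool) : List Char → List Char → Bool
  | x :: a', y :: b' =>
      if x = y then oneEditSkip sameLen a' b'
      else if sameLen then a' == b' else (x :: a') == b'
  | [], b => if sameLen then false else b.drop 1 == ([] : List Char)
  | _ :: _, [] => false

def oneEditApart (a b : List Char) : Bool :=
  let p := if a.length > b.length then (b, a) else (a, b)
  if p.2.length - p.1.length > 1 then false
  else oneEditSkip (p.1.length == p.2.length) p.1 p.2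

-- the for-loop of B with its count / found state and early `return None`
def bLoop (c : List Char) : List String → Int → Option String → Option String
  | [], count, found => if count = 1 then found else none
  | sid :: rest, count, found =>
      if oneEditApart c sid.toList then
        if count + 1 > 1 then none
        else bLoop c rest (count + 1) (some sid)
      else bLoop c rest count found

def match_to_student_list_alt (candidate : String) (student_id_list : List String) (allow_edit_distance_1 : Bool) : Option String :=
  if candidate = "" ∨ student_id_list = [] then none
  else if candidate ∈ student_id_list then some candidate
  else if allow_edit_distance_1 then bLoop candidate.toList student_id_list 0 none
  else none

-- ===== PRECONDITION & SPEC =====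
def Spec_match_to_student_list (candidate : String) (student_id_list : List String) (allow_edit_distance_1 : Bool) (out : Option String) : Prop := out = match_to_student_list_alt candidate student_id_list allow_edit_distance_1
instance (candidate : String) (student_id_list : List String) (allow_edit_distance_1 : Bool) (out : Option String) : Decidable (Spec_match_to_student_list candidate student_id_list allow_edit_distance_1 out) := by unfold Spec_match_to_student_list; infer_instance

-- ===== CLAIM (what is proved, stated in full; the proofs are below) =====
def Claim_equal_match_to_student_list : Prop := ∀ (candidate : String) (student_id_list : List String) (allow_edit_distance_1 : Bool), Dom_match_to_student_list candidate student_id_list allow_edit_distance_1 → Spec_match_to_student_list candidate student_id_list allow_edit_distance_1 (match_to_student_list candidate student_id_list allow_edit_distance_1)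

-- ===== LEMMAS AND PROOFS =====

-- reference Levenshtein distance, recursing on the FRONT, min-terms in A's order
-- (insertions, deletions, substitutions)
def lev : List Char → List Char → Nat
  | [], t => t.length
  | a :: s, [] => (a :: s).length
  | a :: s, b :: t =>
      min (min (lev s (b :: t) + 1) (lev (a :: s) t + 1)) (lev s t + (if a = b then 0 else 1))
termination_by s t => s.length + t.length

-- `t is obtained from s by exactly one insertion, deletion or substitution`
def OneEdit (s t : List Char) : Prop :=
  (∃ u v x, s = u ++ v ∧ t = u ++ x :: v) ∨
  (∃ u v x, s = u ++ x :: v ∧ t = u ++ v) ∨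
  (∃ u v x y, x ≠ y ∧ s = u ++ x :: v ∧ t = u ++ y :: v)

theorem lev_cons_cons (a b : Char) (s t : List Char) :
    lev (a :: s) (b :: t) =
      min (min (lev s (b :: t) + 1) (lev (a :: s) t + 1)) (lev s t + (if a = b then 0 else 1)) := by
  simp [lev]

theorem lev_nil_right (s : List Char) : lev s [] = s.length := by
  cases s <;> simp [lev]

theorem lev_self (s : List Char) : lev s s = 0 := by
  induction s with
  | nil => simp [lev]
  | cons a s ih => rw [lev_cons_cons, if_pos rfl]; omega

theorem lev_eq_zero_iff : ∀ s t : List Char, lev s t = 0 ↔ s = t := by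
  intro s
  induction s with
  | nil => intro t; cases t <;> simp [lev]
  | cons a s ih =>
      intro t
      cases t with
      | nil => simp [lev]
      | cons b t =>
          constructor
          · intro h
            rw [lev_cons_cons] at h
            by_cases hab : a = b
            · rw [if_pos hab] at h
              subst hab
              have h3 : lev s t = 0 := by omega
              rw [(ih t).1 h3]
            · rw [if_neg hab] at h
              exact absurd h (by omega)
          · intro h
            rw [h, lev_self]

theorem oneEdit_cons {s t : List Char} (c : Char) (h : OneEdit s t) : OneEdit (c :: s) (c :: t) := by
  rcases h with ⟨u, v, x, h1, h2⟩ | ⟨u, v, x, h1, h2⟩ | ⟨u, v, x, y, hxy, h1, h2⟩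
  · exact Or.inl ⟨c :: u, v, x, by simp [h1], by simp [h2]⟩
  · exact Or.inr (Or.inl ⟨c :: u, v, x, by simp [h1], by simp [h2]⟩)
  · exact Or.inr (Or.inr ⟨c :: u, v, x, y, hxy, by simp [h1], by simp [h2]⟩)

theorem oneEdit_symm {s t : List Char} (h : OneEdit s t) : OneEdit t s := by
  rcases h with ⟨u, v, x, h1, h2⟩ | ⟨u, v, x, h1, h2⟩ | ⟨u, v, x, y, hxy, h1, h2⟩
  · exact Or.inr (Or.inl ⟨u, v, x, h2, h1⟩)
  · exact Or.inl ⟨u, v, x, h2, h1⟩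
  · exact Or.inr (Or.inr ⟨u, v, y, x, Ne.symm hxy, h2, h1⟩)

theorem oneEdit_reverse {s t : List Char} (h : OneEdit s t) : OneEdit s.reverse t.reverse := by
  rcases h with ⟨u, v, x, h1, h2⟩ | ⟨u, v, x, h1, h2⟩ | ⟨u, v, x, y, hxy, h1, h2⟩
  · exact Or.inl ⟨v.reverse, u.reverse, x, by simp [h1], by simp [h2]⟩
  · exact Or.inr (Or.inl ⟨v.reverse, u.reverse, x, by simp [h1], by simp [h2]⟩)
  · exact Or.inr (Or.inr ⟨v.reverse, u.reverse, x, y, hxy, by simp [h1], by simp [h2]⟩)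

theorem oneEdit_reverse_iff (s t : List Char) : OneEdit s.reverse t.reverse ↔ OneEdit s t := by
  constructor
  · intro h
    have := oneEdit_reverse h
    simpa using this
  · exact oneEdit_reverse

theorem oneEdit_length {s t : List Char} (h : OneEdit s t) :
    s.length + 1 = t.length ∨ t.length + 1 = s.length ∨ s.length = t.length := by
  rcases h with ⟨u, v, x, h1, h2⟩ | ⟨u, v, x, h1, h2⟩ | ⟨u, v, x, y, hxy, h1, h2⟩ <;>
    subst h1 <;> subst h2 <;> simp <;> omega

theorem oneEdit_ne {s t : List Char} (h : OneEdit s t) : s ≠ t := by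
  rcases h with ⟨u, v, x, h1, h2⟩ | ⟨u, v, x, h1, h2⟩ | ⟨u, v, x, y, hxy, h1, h2⟩ <;>
    subst h1 <;> subst h2
  · intro he; apply_fun List.length at he; simp at he
  · intro he; apply_fun List.length at he; simp at he
  · intro he
    have := List.append_cancel_left he
    exact hxy (by injection this)

theorem lev_le_one_ins : ∀ (u v : List Char) (x : Char), lev (u ++ v) (u ++ x :: v) ≤ 1 := by
  intro u
  induction u with
  | nil =>
      intro v x
      cases v with
      | nil => simp [lev]
      | cons a v' =>
          have h := lev_self (a :: v')
          rw [List.nil_append, List.nil_append, lev_cons_cons]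
          omega
  | cons c u' ih =>
      intro v x
      have h := ih v x
      rw [List.cons_append, List.cons_append, lev_cons_cons, if_pos rfl]
      omega

theorem lev_le_one_del : ∀ (u v : List Char) (x : Char), lev (u ++ x :: v) (u ++ v) ≤ 1 := by
  intro u
  induction u with
  | nil =>
      intro v x
      cases v with
      | nil => simp [lev]
      | cons a v' =>
          have h := lev_self (a :: v')
          rw [List.nil_append, List.nil_append, lev_cons_cons]
          omega
  | cons c u' ih =>
      intro v x
      have h := ih v x
      rw [List.cons_append, List.cons_append, lev_cons_cons, if_pos rfl]
      omega

theorem lev_le_one_sub : ∀ (u v : List Char) (x y : Char), lev (u ++ x :: v) (u ++ y :: v) ≤ 1 := by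
  intro u
  induction u with
  | nil =>
      intro v x y
      have h := lev_self v
      rw [List.nil_append, List.nil_append, lev_cons_cons]
      have h2 : (if x = y then 0 else 1) ≤ 1 := by split_ifs <;> omega
      omega
  | cons c u' ih =>
      intro v x y
      have h := ih v x y
      rw [List.cons_append, List.cons_append, lev_cons_cons, if_pos rfl]
      omega

theorem lev_eq_one_of_oneEdit {s t : List Char} (h : OneEdit s t) : lev s t = 1 := by
  have hne : lev s t ≠ 0 := fun h0 => oneEdit_ne h ((lev_eq_zero_iff s t).1 h0)
  have hle : lev s t ≤ 1 := by
    rcases h with ⟨u, v, x, h1, h2⟩ | ⟨u, v, x, h1, h2⟩ | ⟨u, v, x, y, hxy, h1, h2⟩ <;>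
      subst h1 <;> subst h2
    · exact lev_le_one_ins u v x
    · exact lev_le_one_del u v x
    · exact lev_le_one_sub u v x y
  omega

theorem oneEdit_of_lev_eq_one : ∀ s t : List Char, lev s t = 1 → OneEdit s t := by
  intro s
  induction s with
  | nil =>
      intro t h
      cases t with
      | nil => simp [lev] at h
      | cons b t' =>
          simp only [lev, List.length_cons] at h
          have : t' = [] := by
            cases t' with
            | nil => rfl
            | cons _ _ => simp at h
          subst this
          exact Or.inl ⟨[], [], b, rfl, rfl⟩
  | cons a s ih =>
      intro t h
      cases t with
      | nil =>
          simp only [lev, List.length_cons] at h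
          have : s = [] := by
            cases s with
            | nil => rfl
            | cons _ _ => simp at h
          subst this
          exact Or.inr (Or.inl ⟨[], [], a, rfl, rfl⟩)
      | cons b t =>
          rw [lev_cons_cons] at h
          by_cases h2 : lev (a :: s) t = 0
          · have ht : a :: s = t := (lev_eq_zero_iff _ _).1 h2
            exact Or.inl ⟨[], a :: s, b, by simp, by simp [ht]⟩
          by_cases h1 : lev s (b :: t) = 0
          · have hs : s = b :: t := (lev_eq_zero_iff _ _).1 h1
            exact Or.inr (Or.inl ⟨[], b :: t, a, by simp [hs], by simp⟩)
          by_cases hab : a = b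
          · rw [if_pos hab] at h
            have h3 : lev s t = 1 := by omega
            subst hab
            exact oneEdit_cons a (ih t h3)
          · rw [if_neg hab] at h
            have h3 : lev s t = 0 := by omega
            have hst : s = t := (lev_eq_zero_iff _ _).1 h3
            subst hst
            exact Or.inr (Or.inr ⟨[], s, a, b, hab, by simp, by simp⟩)

theorem lev_eq_one_iff (s t : List Char) : lev s t = 1 ↔ OneEdit s t :=
  ⟨oneEdit_of_lev_eq_one s t, lev_eq_one_of_oneEdit⟩

-- the DP row after consuming (reversed) prefix u of s1: entries lev u v, lev u (c0::v), …
def rowList (u v : List Char) : List Char → List Int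
  | [] => [(lev u v : Int)]
  | c :: rest => (lev u v : Int) :: rowList u (c :: v) rest

theorem rowList_head (u v rest : List Char) :
    rowList u v rest = (lev u v : Int) :: (rowList u v rest).tail := by
  cases rest <;> simp [rowList]

theorem aInner_rowList (c1 : Char) (u : List Char) :
    ∀ (rest v : List Char),
      aInner c1 (lev (c1 :: u) v : Int) (rowList u v rest) rest =
        (rowList (c1 :: u) v rest).tail := by
  intro rest
  induction rest with
  | nil => intro v; simp [rowList, aInner]
  | cons c2 crest ih =>
      intro v
      rw [rowList, rowList]
      rw [aInner]
      have hhead : (rowList u (c2 :: v) crest).headD 0 = (lev u (c2 :: v) : Int) := by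
        rw [rowList_head u (c2 :: v) crest]; rfl
      have hcell :
          min (min ((rowList u (c2 :: v) crest).headD 0 + 1) ((lev (c1 :: u) v : Int) + 1))
              ((lev u v : Int) + (if c1 ≠ c2 then 1 else 0)) =
            (lev (c1 :: u) (c2 :: v) : Int) := by
        rw [hhead, lev_cons_cons]
        push_cast
        by_cases hc : c1 = c2 <;> simp [hc]
      simp only [hcell]
      rw [ih (c2 :: v)]
      rw [rowList_head (c1 :: u) (c2 :: v) crest]
      simp

theorem aOuter_rowList :
    ∀ (s1rem u s2 : List Char),
      aOuter (u.length : Int) (rowList u [] s2) s1rem s2 =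
        rowList (s1rem.reverse ++ u) [] s2 := by
  intro s1rem
  induction s1rem with
  | nil => intro u s2; simp [aOuter]
  | cons c1 rest ih =>
      intro u s2
      rw [aOuter]
      have hlast : ((u.length : Int) + 1) = (lev (c1 :: u) [] : Int) := by
        rw [lev_nil_right]; push_cast [List.length_cons]; ring
      rw [hlast, aInner_rowList c1 u s2 []]
      rw [← rowList_head (c1 :: u) [] s2]
      have h2 : (lev (c1 :: u) [] : Int) = (((c1 :: u).length : Nat) : Int) := by
        rw [lev_nil_right]
      rw [h2, ih (c1 :: u) s2]
      simp

theorem rowList_getLast? (u : List Char) :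
    ∀ (rest v : List Char),
      (rowList u v rest).getLast? = some (lev u (rest.reverse ++ v) : Int) := by
  intro rest
  induction rest with
  | nil => intro v; simp [rowList]
  | cons c r ih =>
      intro v
      rw [rowList, rowList_head u (c :: v) r, List.getLast?_cons_cons,
        ← rowList_head u (c :: v) r, ih (c :: v)]
      simp

theorem rowList_nil_eq_pyRange :
    ∀ (rest v : List Char),
      rowList [] v rest =
        PySem.List.pyRange (v.length : Int) ((v.length : Int) + (rest.length : Int) + 1) 1 := by
  intro rest
  induction rest with
  | nil =>
      intro v
      rw [rowList]
      have h1 : ((v.length : Int) + (([] : List Char).length : Int) + 1) = (v.length : Int) + 1 := by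
        simp
      rw [h1, PySem.List.pyRange_one_singleton]
      simp [lev]
  | cons c r ih =>
      intro v
      rw [rowList, ih (c :: v)]
      conv_rhs => rw [PySem.List.pyRange_one_cons (by push_cast; omega)]
      congr 1
      · simp [lev]
      · congr 1
        push_cast [List.length_cons]
        ring

theorem initRow (s2 : List Char) :
    PySem.List.pyRange 0 ((s2.length : Int) + 1) 1 = rowList [] [] s2 := by
  rw [rowList_nil_eq_pyRange s2 []]
  norm_num

theorem editDistCore_eq (s1 s2 : List Char) :
    editDistCore s1 s2 = (lev s1.reverse s2.reverse : Int) := by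
  unfold editDistCore
  by_cases h : s2 = []
  · subst h
    simp [lev_nil_right]
  · rw [if_neg h]
    rw [initRow s2]
    have h0 : (0 : Int) = (([] : List Char).length : Int) := by simp
    rw [h0, aOuter_rowList s1 [] s2]
    rw [PySem.List.pyGet?_neg_one]
    rw [List.append_nil]
    rw [rowList_getLast? s1.reverse s2 []]
    simp

theorem editDistA_eq_one_iff (s t : List Char) :
    (editDistA s t == 1) = true ↔ OneEdit s t := by
  unfold editDistA
  by_cases h : s.length < t.length
  · rw [if_pos h, editDistCore_eq]
    simp only [beq_iff_eq]
    rw [show ((lev t.reverse s.reverse : Int) = 1 ↔ lev t.reverse s.reverse = 1) by omega]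
    rw [lev_eq_one_iff, oneEdit_reverse_iff]
    exact ⟨oneEdit_symm, oneEdit_symm⟩
  · rw [if_neg h, editDistCore_eq]
    simp only [beq_iff_eq]
    rw [show ((lev s.reverse t.reverse : Int) = 1 ↔ lev s.reverse t.reverse = 1) by omega]
    rw [lev_eq_one_iff, oneEdit_reverse_iff]

theorem skip_same :
    ∀ a b : List Char, a.length = b.length →
      (oneEditSkip true a b = true ↔ ∃ u x y v, x ≠ y ∧ a = u ++ x :: v ∧ b = u ++ y :: v) := by
  intro a
  induction a with
  | nil =>
      intro b hlen
      have hb : b = [] := by cases b <;> simp_all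
      subst hb
      simp only [oneEditSkip]
      constructor
      · intro h; simp at h
      · rintro ⟨u, x, y, v, _, h1, _⟩
        exact absurd h1 (by simp)
  | cons x a' ih =>
      intro b hlen
      cases b with
      | nil => simp at hlen
      | cons y b' =>
          have hlen' : a'.length = b'.length := by simpa using hlen
          rw [oneEditSkip]
          by_cases hxy : x = y
          · subst hxy
            rw [if_pos rfl, ih b' hlen']
            constructor
            · rintro ⟨u, p, q, v, hpq, h1, h2⟩
              exact ⟨x :: u, p, q, v, hpq, by rw [h1]; rfl, by rw [h2]; rfl⟩
            · rintro ⟨u, p, q, v, hpq, h1, h2⟩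
              cases u with
              | nil =>
                  simp only [List.nil_append, List.cons.injEq] at h1 h2
                  exact absurd (h1.1.symm.trans h2.1) hpq
              | cons c u' =>
                  simp only [List.cons_append, List.cons.injEq] at h1 h2
                  exact ⟨u', p, q, v, hpq, h1.2, h2.2⟩
          · rw [if_neg hxy, if_pos rfl]
            constructor
            · intro h
              have he : a' = b' := by simpa using h
              exact ⟨[], x, y, a', hxy, rfl, by simp [he]⟩
            · rintro ⟨u, p, q, v, hpq, h1, h2⟩
              cases u with
              | nil =>
                  simp only [List.nil_append, List.cons.injEq] at h1 h2
                  rw [h1.2, h2.2]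
                  simp
              | cons c u' =>
                  simp only [List.cons_append, List.cons.injEq] at h1 h2
                  exact absurd (h1.1.trans h2.1.symm) hxy

theorem skip_ins :
    ∀ a b : List Char, b.length = a.length + 1 →
      (oneEditSkip false a b = true ↔ ∃ u x v, a = u ++ v ∧ b = u ++ x :: v) := by
  intro a
  induction a with
  | nil =>
      intro b hlen
      have hb : ∃ c, b = [c] := by
        cases b with
        | nil => simp at hlen
        | cons c b' =>
            cases b' with
            | nil => exact ⟨c, rfl⟩
            | cons _ _ => simp at hlen
      obtain ⟨c, hc⟩ := hb
      subst hc
      simp only [oneEditSkip]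
      constructor
      · intro _; exact ⟨[], c, [], rfl, rfl⟩
      · intro _; simp
  | cons x a' ih =>
      intro b hlen
      cases b with
      | nil => simp at hlen
      | cons y b' =>
          have hlen' : b'.length = a'.length + 1 := by simpa using hlen
          rw [oneEditSkip]
          by_cases hxy : x = y
          · subst hxy
            rw [if_pos rfl, ih b' hlen']
            constructor
            · rintro ⟨u, c, v, h1, h2⟩
              exact ⟨x :: u, c, v, by rw [h1]; rfl, by rw [h2]; rfl⟩
            · rintro ⟨u, c, v, h1, h2⟩
              cases u with
              | nil =>
                  simp only [List.nil_append] at h1 h2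
                  subst h1
                  simp only [List.cons.injEq] at h2
                  exact ⟨[], x, a', rfl, by simp [h2.2]⟩
              | cons d u' =>
                  simp only [List.cons_append, List.cons.injEq] at h1 h2
                  exact ⟨u', c, v, h1.2, h2.2⟩
          · rw [if_neg hxy]
            simp only [Bool.false_eq_true, if_false]
            constructor
            · intro h
              have he : x :: a' = b' := by simpa using h
              exact ⟨[], y, x :: a', rfl, by simp [he]⟩
            · rintro ⟨u, c, v, h1, h2⟩
              cases u with
              | nil =>
                  simp only [List.nil_append, List.cons.injEq] at h1 h2
                  rw [h2.2, ← h1]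
                  simp
              | cons d u' =>
                  simp only [List.cons_append, List.cons.injEq] at h1 h2
                  exact absurd (h1.1.trans h2.1.symm) hxy

theorem oneEditApart_iff (a b : List Char) : oneEditApart a b = true ↔ OneEdit a b := by
  unfold oneEditApart
  by_cases hgt : a.length > b.length
  · rw [if_pos hgt]
    simp only
    by_cases hd : a.length - b.length > 1
    · rw [if_pos hd]
      constructor
      · intro h; simp at h
      · intro h
        have := oneEdit_length h
        omega
    · rw [if_neg hd]
      have hne : (b.length == a.length) = false := by
        simp only [beq_eq_false_iff_ne]; omega
      rw [hne]
      rw [skip_ins b a (by omega)]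
      constructor
      · rintro ⟨u, x, v, h1, h2⟩
        exact Or.inr (Or.inl ⟨u, v, x, h2, h1⟩)
      · intro h
        rcases h with ⟨u, v, x, h1, h2⟩ | ⟨u, v, x, h1, h2⟩ | ⟨u, v, x, y, hxy, h1, h2⟩
        · subst h1; subst h2; simp at hgt
        · exact ⟨u, x, v, h2, h1⟩
        · subst h1; subst h2; simp at hgt
  · rw [if_neg hgt]
    simp only
    by_cases hd : b.length - a.length > 1
    · rw [if_pos hd]
      constructor
      · intro h; simp at h
      · intro h
        have := oneEdit_length h
        omega
    · rw [if_neg hd]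
      by_cases heq : a.length = b.length
      · rw [show (a.length == b.length) = true by simpa using heq]
        rw [skip_same a b heq]
        constructor
        · rintro ⟨u, x, y, v, hxy, h1, h2⟩
          exact Or.inr (Or.inr ⟨u, v, x, y, hxy, h1, h2⟩)
        · intro h
          rcases h with ⟨u, v, x, h1, h2⟩ | ⟨u, v, x, h1, h2⟩ | ⟨u, v, x, y, hxy, h1, h2⟩
          · subst h1; subst h2; simp at heq
          · subst h1; subst h2; simp at heq
          · exact ⟨u, x, y, v, hxy, h1, h2⟩
      · rw [show (a.length == b.length) = false by simpa using heq]
        rw [skip_ins a b (by omega)]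
        constructor
        · rintro ⟨u, x, v, h1, h2⟩
          exact Or.inl ⟨u, v, x, h1, h2⟩
        · intro h
          rcases h with ⟨u, v, x, h1, h2⟩ | ⟨u, v, x, h1, h2⟩ | ⟨u, v, x, y, hxy, h1, h2⟩
          · exact ⟨u, x, v, h1, h2⟩
          · subst h1; subst h2; simp at hgt
          · subst h1; subst h2; simp at heq

theorem pointwise (c sid : List Char) :
    (editDistA c sid == 1) = oneEditApart c sid := by
  rw [Bool.eq_iff_iff]
  exact (editDistA_eq_one_iff c sid).trans (oneEditApart_iff c sid).symm

theorem bLoop_one (c : List Char) :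
    ∀ (ids : List String) (f : String),
      bLoop c ids 1 (some f) =
        (if ids.filter (fun sid => oneEditApart c sid.toList) = [] then some f else none) := by
  intro ids
  induction ids with
  | nil => intro f; simp [bLoop]
  | cons sid rest ih =>
      intro f
      rw [bLoop]
      by_cases hq : oneEditApart c sid.toList
      · simp [hq]
      · rw [if_neg (by simp [hq]), ih f]
        simp [hq]

theorem bLoop_eq (c : List Char) (ids : List String) :
    bLoop c ids 0 none =
      (let m := ids.filter (fun sid => oneEditApart c sid.toList)
       if m.length = 1 then m.head? else none) := by
  induction ids with
  | nil => simp [bLoop]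
  | cons sid rest ih =>
      simp only
      rw [bLoop]
      by_cases hq : oneEditApart c sid.toList
      · rw [if_pos hq, if_neg (by omega), show ((0 : Int) + 1) = 1 from rfl,
          bLoop_one c rest sid]
        by_cases hf : rest.filter (fun sid => oneEditApart c sid.toList) = []
        · simp [hq, hf]
        · have hlen0 : (rest.filter (fun sid => oneEditApart c sid.toList)).length ≠ 0 := by
            simpa [List.length_eq_zero_iff] using hf
          rw [if_neg hf, List.filter_cons_of_pos (by simpa using hq)]
          rw [if_neg (by simp only [List.length_cons]; omega)]
      · rw [if_neg (by simp [hq])]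
        simp only at ih
        rw [ih]
        simp [hq]

-- ===== VERDICT (by name: the statement is the Claim_ definition above) =====
theorem match_to_student_list_spec : Claim_equal_match_to_student_list := by
  intro candidate ids allow _
  unfold Spec_match_to_student_list match_to_student_list match_to_student_list_alt
  by_cases h0 : candidate = "" ∨ ids = []
  · simp [h0]
  · simp only [h0, if_false]
    by_cases hm : candidate ∈ ids
    · simp [hm]
    · simp only [hm, if_false]
      by_cases ha : allow = true
      · subst ha
        simp only [if_true, bLoop_eq]
        have hpt : ∀ (sid : String), (editDistA candidate.toList sid.toList == 1) = oneEditApart candidate.toList sid.toList :=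
          fun sid => pointwise _ _
        simp only [hpt]
      · simp [ha]
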